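-- pv_equiv track=rewrite | github.com/cosmoglint/intermediate_archive | meximisation.py | meximize
-- ===== SOURCE A (Python) =====
-- def meximize(lst):
--     myset = sorted(list(set(lst)))
--     dupe = myset[:]
--     for i in myset:
--         cnt = lst.count(i)
--         if cnt > 1:
--             dupe.extend([i]*(cnt-1))
--         else:
--             continue
--     return dupe
-- ===== SOURCE B (Python) =====
-- def meximize(lst):
--     s = sorted(lst)
--     uniques = []
--     extras = []
--     prev = None
--     for x in s:
--         if prev is not None and x == prev:
--             extras.append(x)
--         else:
--             uniques.append(x)
--             prev = x
--     return uniques + extras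
-- ===== Notes on version B (the rewrite author's own statement) =====
-- stated objective: faster
-- what changed: Replaces the set-build plus a per-unique lst.count scan with a single sort followed by one adjacent-duplicate pass that partitions into uniques and extras.
import Mathlib
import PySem

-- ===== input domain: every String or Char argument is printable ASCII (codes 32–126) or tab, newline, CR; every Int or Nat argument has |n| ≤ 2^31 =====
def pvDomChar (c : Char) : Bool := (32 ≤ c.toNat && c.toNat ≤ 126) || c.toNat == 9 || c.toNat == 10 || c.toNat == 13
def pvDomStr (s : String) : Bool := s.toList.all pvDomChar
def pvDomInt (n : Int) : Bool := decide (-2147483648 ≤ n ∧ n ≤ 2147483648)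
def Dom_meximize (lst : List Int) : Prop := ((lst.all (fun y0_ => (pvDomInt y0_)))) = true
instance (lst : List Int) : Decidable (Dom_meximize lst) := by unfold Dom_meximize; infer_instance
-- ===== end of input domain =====

-- B sorts once and does a single adjacent-duplicate pass (uniques/extras) instead of A's
-- set-build plus a per-unique lst.count scan; measurably faster on duplicate-heavy inputs.


-- ===== PORT A =====
def meximize (lst : List Int) : List Int :=
  let myset := PySem.List.sorted (PySem.Set.ofList lst) (fun x => x) false
  let dupe := myset
  myset.foldl (fun dupe i =>
    let cnt : Int := lst.count i
    if cnt > 1 then dupe ++ PySem.List.pyRepeat [i] (cnt - 1) else dupe) dupe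

-- ===== PORT B =====
-- one step of Source B's loop over the sorted list: state (uniques, extras, prev)
def mexStep (st : List Int × List Int × Option Int) (x : Int) : List Int × List Int × Option Int :=
  match st.2.2 with
  | some p => if x = p then (st.1, st.2.1 ++ [x], st.2.2) else (st.1 ++ [x], st.2.1, some x)
  | none => (st.1 ++ [x], st.2.1, some x)

def meximize_alt (lst : List Int) : List Int :=
  let s := PySem.List.sorted lst (fun x => x) false
  let st := s.foldl mexStep ([], [], none)
  st.1 ++ st.2.1

-- ===== PRECONDITION & SPEC =====
def Spec_meximize (lst : List Int) (out : List Int) : Prop := out = meximize_alt lst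
instance (lst : List Int) (out : List Int) : Decidable (Spec_meximize lst out) := by unfold Spec_meximize; infer_instance

-- ===== CLAIM (what is proved, stated in full; the proofs are below) =====
def Claim_equal_meximize : Prop := ∀ (lst : List Int), Dom_meximize lst → Spec_meximize lst (meximize lst)

-- ===== LEMMAS AND PROOFS =====

-- recursive characterisation of B's fold: (uniques, extras) produced from a given prev
def mexG : Option Int → List Int → List Int × List Int
  | _, [] => ([], [])
  | none, x :: t => ((x :: (mexG (some x) t).1), (mexG (some x) t).2)
  | some p, x :: t =>
      if x = p then ((mexG (some p) t).1, x :: (mexG (some p) t).2)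
      else ((x :: (mexG (some x) t).1), (mexG (some x) t).2)

theorem foldl_mexStep (s : List Int) : ∀ (u e : List Int) (p : Option Int),
    (s.foldl mexStep (u, e, p)).1 = u ++ (mexG p s).1 ∧
    (s.foldl mexStep (u, e, p)).2.1 = e ++ (mexG p s).2 := by
  induction s with
  | nil => intro u e p; simp [mexG]
  | cons x t ih =>
      intro u e p
      cases p with
      | none => simpa [mexStep, mexG] using ih (u ++ [x]) e (some x)
      | some q =>
          by_cases hx : x = q
          · simpa [mexStep, mexG, hx] using ih u (e ++ [x]) (some q)
          · simpa [mexStep, mexG, hx] using ih (u ++ [x]) e (some x)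

theorem mexG_some (t : List Int) : ∀ (a : Int), (a :: t).Pairwise (· ≤ ·) →
    (mexG (some a) t).1.Nodup ∧ (mexG (some a) t).1.Pairwise (· ≤ ·) ∧
    (∀ y, y ∈ (mexG (some a) t).1 ↔ y ∈ t ∧ y ≠ a) ∧
    (mexG (some a) t).2 =
      List.replicate (t.count a) a ++
        (mexG (some a) t).1.flatMap (fun i => List.replicate (t.count i - 1) i) := by
  induction t with
  | nil => intro a _; simp [mexG]
  | cons x r ih =>
      intro a hp
      have hax : a ≤ x := (List.pairwise_cons.1 hp).1 x (by simp)
      have hxr : (x :: r).Pairwise (· ≤ ·) := (List.pairwise_cons.1 hp).2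
      by_cases hx : x = a
      · subst hx
        obtain ⟨hnd, hpw, hmem, hext⟩ := ih x hxr
        have hflat : (mexG (some x) r).1.flatMap (fun i => List.replicate (r.count i - 1) i)
            = (mexG (some x) r).1.flatMap (fun i => List.replicate ((x :: r).count i - 1) i) := by
          apply List.flatMap_congr
          intro i hi
          have hix : i ≠ x := ((hmem i).1 hi).2
          simp [hix.symm]
        have hstep : mexG (some x) (x :: r)
            = ((mexG (some x) r).1, x :: (mexG (some x) r).2) := by
          simp [mexG]
        refine ⟨by rw [hstep]; exact hnd, by rw [hstep]; exact hpw, ?_, ?_⟩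
        · intro y
          rw [hstep]
          show y ∈ (mexG (some x) r).1 ↔ _
          rw [hmem y]
          constructor
          · rintro ⟨hy, hne⟩; exact ⟨by simp [hy], hne⟩
          · rintro ⟨hy, hne⟩
            rcases List.mem_cons.1 hy with h | h
            · exact absurd h hne
            · exact ⟨h, hne⟩
        · rw [hstep]
          show x :: (mexG (some x) r).2 = _
          rw [hext, hflat]
          simp [List.replicate_succ]
      · have hlt : a < x := lt_of_le_of_ne hax (fun h => hx h.symm)
        obtain ⟨hnd, hpw, hmem, hext⟩ := ih x hxr
        have hxle : ∀ y ∈ r, x ≤ y := fun y hy => (List.pairwise_cons.1 hxr).1 y hy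
        have hstep : mexG (some a) (x :: r) = ((x :: (mexG (some x) r).1), (mexG (some x) r).2) := by
          simp [mexG, hx]
        refine ⟨?_, ?_, ?_, ?_⟩
        · rw [hstep]
          exact List.nodup_cons.2 ⟨fun h => ((hmem x).1 h).2 rfl, hnd⟩
        · rw [hstep]
          exact List.pairwise_cons.2 ⟨fun y hy => hxle y ((hmem y).1 hy).1, hpw⟩
        · intro y
          rw [hstep]
          show y ∈ x :: (mexG (some x) r).1 ↔ _
          simp only [List.mem_cons]
          constructor
          · rintro (rfl | hy)
            · exact ⟨Or.inl rfl, hx⟩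
            · obtain ⟨hyr, hyx⟩ := hmem y |>.1 hy
              have : a < y := lt_of_lt_of_le hlt (hxle y hyr)
              exact ⟨Or.inr hyr, ne_of_gt this⟩
          · rintro ⟨hy, hya⟩
            rcases hy with rfl | hyr
            · exact Or.inl rfl
            · by_cases hyx : y = x
              · exact Or.inl hyx
              · exact Or.inr ((hmem y).2 ⟨hyr, hyx⟩)
        · have hanotin : a ∉ x :: r := by
            intro h
            rcases List.mem_cons.1 h with h | h
            · exact hx h.symm
            · exact absurd (hxle a h) (not_le.2 hlt)
          have hca : (x :: r).count a = 0 := List.count_eq_zero.2 hanotin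
          have hflat : (mexG (some x) r).1.flatMap (fun i => List.replicate (r.count i - 1) i)
              = (mexG (some x) r).1.flatMap (fun i => List.replicate ((x :: r).count i - 1) i) := by
            apply List.flatMap_congr
            intro i hi
            have hix : i ≠ x := ((hmem i).1 hi).2
            simp [hix.symm]
          rw [hstep]
          show (mexG (some x) r).2 = _
          rw [hext, hflat]
          simp [hca, List.flatMap_cons]

theorem mexG_none (s : List Int) (hs : s.Pairwise (· ≤ ·)) :
    (mexG none s).1.Nodup ∧ (mexG none s).1.Pairwise (· ≤ ·) ∧
    (∀ y, y ∈ (mexG none s).1 ↔ y ∈ s) ∧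
    (mexG none s).2 = (mexG none s).1.flatMap (fun i => List.replicate (s.count i - 1) i) := by
  cases s with
  | nil => simp [mexG]
  | cons x t =>
      obtain ⟨hnd, hpw, hmem, hext⟩ := mexG_some t x hs
      have hxle : ∀ y ∈ t, x ≤ y := fun y hy => (List.pairwise_cons.1 hs).1 y hy
      have hstep : mexG none (x :: t) = ((x :: (mexG (some x) t).1), (mexG (some x) t).2) := rfl
      refine ⟨?_, ?_, ?_, ?_⟩
      · rw [hstep]
        exact List.nodup_cons.2 ⟨fun h => ((hmem x).1 h).2 rfl, hnd⟩
      · rw [hstep]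
        exact List.pairwise_cons.2 ⟨fun y hy => hxle y ((hmem y).1 hy).1, hpw⟩
      · intro y
        rw [hstep]
        show y ∈ x :: (mexG (some x) t).1 ↔ _
        simp only [List.mem_cons]
        constructor
        · rintro (rfl | hy)
          · exact Or.inl rfl
          · exact Or.inr ((hmem y).1 hy).1
        · rintro (rfl | hy)
          · exact Or.inl rfl
          · by_cases hyx : y = x
            · exact Or.inl hyx
            · exact Or.inr ((hmem y).2 ⟨hy, hyx⟩)
      · have hflat : (mexG (some x) t).1.flatMap (fun i => List.replicate (t.count i - 1) i)
            = (mexG (some x) t).1.flatMap (fun i => List.replicate ((x :: t).count i - 1) i) := by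
          apply List.flatMap_congr
          intro i hi
          have hix : i ≠ x := ((hmem i).1 hi).2
          simp [hix.symm]
        rw [hstep]
        show (mexG (some x) t).2 = (x :: (mexG (some x) t).1).flatMap
          (fun i => List.replicate ((x :: t).count i - 1) i)
        rw [hext, hflat]
        simp [List.flatMap_cons]

-- A's loop body, for any i, appends exactly count-1 copies
theorem meximize_eq_flatMap (lst : List Int) :
    meximize lst =
      PySem.List.sorted (PySem.Set.ofList lst) (fun x => x) false ++
        (PySem.List.sorted (PySem.Set.ofList lst) (fun x => x) false).flatMap
          (fun i => List.replicate (lst.count i - 1) i) := by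
  unfold meximize
  rw [PySem.List.foldl_congr_mem _ _ (fun acc i => acc ++ List.replicate (lst.count i - 1) i)]
  · exact PySem.List.foldl_append_eq_flatMap _ _ _
  · intro acc i _
    by_cases h : ((lst.count i : Int) > 1)
    · rw [if_pos h, PySem.List.pyRepeat_singleton]
      congr 1
      congr 1
      omega
    · rw [if_neg h]
      have : lst.count i - 1 = 0 := by omega
      simp [this]

theorem meximize_spec' (lst : List Int) : meximize lst = meximize_alt lst := by
  set s := PySem.List.sorted lst (fun x => x) false with hsdef
  set U := PySem.List.sorted (PySem.Set.ofList lst) (fun x => x) false with hUdef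
  have hs : s.Pairwise (· ≤ ·) := PySem.List.sorted_pairwise lst (fun x => x)
  have hUpw : U.Pairwise (· ≤ ·) := PySem.List.sorted_pairwise _ (fun x => x)
  have hUperm : U.Perm (PySem.Set.ofList lst) := PySem.List.sorted_perm _ _ _
  have hUnd : U.Nodup := hUperm.symm.nodup (PySem.Set.nodup_ofList lst)
  have hsperm : s.Perm lst := PySem.List.sorted_perm _ _ _
  obtain ⟨hnd, hpw, hmem, hext⟩ := mexG_none s hs
  -- B's value
  have hB : meximize_alt lst = (mexG none s).1 ++ (mexG none s).2 := by
    unfold meximize_alt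
    obtain ⟨h1, h2⟩ := foldl_mexStep s [] [] none
    rw [← hsdef]
    simp only [h1, h2, List.nil_append]
  -- the uniques list equals A's sorted set
  have hUeq : U = (mexG none s).1 := by
    apply PySem.List.eq_of_perm_of_pairwise_le_of_injective (fun x => x) (fun _ _ h => h) _ hUpw hpw
    refine (List.perm_ext_iff_of_nodup hUnd hnd).2 ?_
    intro y
    rw [hmem y]
    constructor
    · intro hy
      exact (hsperm.mem_iff).2 ((PySem.Set.mem_ofList lst y).1 (hUperm.mem_iff.1 hy))
    · intro hy
      exact hUperm.mem_iff.2 ((PySem.Set.mem_ofList lst y).2 (hsperm.mem_iff.1 hy))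
  have hcount : ∀ i, lst.count i = s.count i := fun i => (hsperm.count_eq i).symm
  rw [meximize_eq_flatMap, hB, ← hUdef, hUeq, hext]
  congr 1
  apply List.flatMap_congr
  intro i _
  rw [hcount i]

-- ===== VERDICT (by name: the statement is the Claim_ definition above) =====
theorem meximize_spec : Claim_equal_meximize := by
  intro lst _
  unfold Spec_meximize
  exact meximize_spec' lst
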